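-- pv_equiv track=rewrite | github.com/Chriszhangmw/AD_TEST | calcucate_correction_improments.py | decrease_wronglist
-- ===== SOURCE A (Python) =====
-- def decrease_wronglist(compute_number_wrong,wrong_catalog,type):
--     assert compute_number_wrong>0
--     num1 = compute_number_wrong
--     num2 = wrong_catalog.count(type)
--     # if type == "compute":
--     if wrong_catalog.count(type) == 0:
--         return wrong_catalog,0
--     elif wrong_catalog.count(type)>0 and wrong_catalog.count(type) < compute_number_wrong:
--         while wrong_catalog.count(type) > 0:
--             wrong_catalog.remove(type)
--         return wrong_catalog,num2
--     else: #wrong_catalog.count(type) >= compute_number_bad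
--         while compute_number_wrong > 0:
--             wrong_catalog.remove(type)
--             compute_number_wrong -= 1
--         return wrong_catalog, num1
-- ===== SOURCE B (Python) =====
-- def decrease_wronglist(compute_number_wrong, wrong_catalog, type):
--     assert compute_number_wrong > 0
--     idxs = [i for i, x in enumerate(wrong_catalog) if x == type]
--     removed = min(len(idxs), compute_number_wrong)
--     for i in reversed(idxs[:removed]):
--         del wrong_catalog[i]
--     return wrong_catalog, removed
-- ===== Notes on version B (the rewrite author's own statement) =====
-- stated objective: simpler
-- what changed: Replaces A's three-way branch with repeated count()/remove() rescans (each a full list scan) by one enumerate pass collecting the occurrence indices, removed = min(len(idxs), compute_number_wrong), and one reverse-order in-place deletion pass over the first `removed` indices.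
import Mathlib
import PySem

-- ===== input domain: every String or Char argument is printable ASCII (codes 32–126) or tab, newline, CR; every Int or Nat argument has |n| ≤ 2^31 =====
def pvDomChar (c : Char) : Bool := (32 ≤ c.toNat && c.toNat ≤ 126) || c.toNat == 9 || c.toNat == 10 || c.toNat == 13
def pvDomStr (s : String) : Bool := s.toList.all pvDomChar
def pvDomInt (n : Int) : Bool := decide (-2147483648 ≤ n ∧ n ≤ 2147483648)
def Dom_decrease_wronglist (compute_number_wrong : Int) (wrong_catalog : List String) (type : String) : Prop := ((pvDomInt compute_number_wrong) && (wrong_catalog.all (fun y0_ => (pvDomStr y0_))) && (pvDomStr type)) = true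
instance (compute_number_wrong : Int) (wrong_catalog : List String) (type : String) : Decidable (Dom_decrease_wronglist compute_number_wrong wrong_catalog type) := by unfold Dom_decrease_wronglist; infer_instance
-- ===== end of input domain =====

-- B replaces A's repeated count()/remove() rescans by one index-collecting pass and one
-- reverse-order deletion pass (simpler decomposition). Both A and B mutate wrong_catalog
-- in place to the same final content; the equivalence proved here is about the return value.


-- ===== PORT A =====
-- 'while wrong_catalog.count(type) > 0: wrong_catalog.remove(type)' — each iteration removes
-- one occurrence, so the loop runs at most l.length times; fuel = l.length is exact.
def pvA_removeAll (fuel : Nat) (l : List String) (t : String) : List String :=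
  match fuel with
  | 0 => l
  | f + 1 =>
    if PySem.List.count l t > 0 then
      match PySem.List.remove? l t with
      | some l' => pvA_removeAll f l' t
      | none => l  -- unreachable: count l t > 0 means t ∈ l
    else l

-- 'while compute_number_wrong > 0: wrong_catalog.remove(type); compute_number_wrong -= 1'
-- (run only when count ≥ compute_number_wrong, so remove never raises there)
def pvA_removeN (k : Nat) (l : List String) (t : String) : List String :=
  match k with
  | 0 => l
  | k + 1 =>
    match PySem.List.remove? l t with
    | some l' => pvA_removeN k l' t
    | none => l  -- Python would raise ValueError; unreachable in A's else branch

def decrease_wronglist (compute_number_wrong : Int) (wrong_catalog : List String) (type : String) : List String × Int :=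
  -- assert compute_number_wrong > 0 : excluded by Pre_
  let num1 := compute_number_wrong
  let num2 : Int := PySem.List.count wrong_catalog type
  if PySem.List.count wrong_catalog type = 0 then
    (wrong_catalog, 0)
  else if 0 < (PySem.List.count wrong_catalog type : Int) ∧ (PySem.List.count wrong_catalog type : Int) < compute_number_wrong then
    (pvA_removeAll wrong_catalog.length wrong_catalog type, num2)
  else
    (pvA_removeN compute_number_wrong.toNat wrong_catalog type, num1)

-- ===== PORT B =====
def decrease_wronglist_alt (compute_number_wrong : Int) (wrong_catalog : List String) (type : String) : List String × Int :=
  -- assert compute_number_wrong > 0 : excluded by Pre_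
  let idxs : List Int := ((PySem.List.enumerate wrong_catalog).filter (fun p => p.2 == type)).map (·.1)
  let removed : Int := min (idxs.length : Int) compute_number_wrong
  -- 'for i in reversed(idxs[:removed]): del wrong_catalog[i]' ; removed ≥ 0 under Pre_,
  -- so idxs[:removed] = take removed.toNat, and each i is a valid nonnegative index
  let out : List String := ((idxs.take removed.toNat).reverse).foldl (fun l i => l.eraseIdx i.toNat) wrong_catalog
  (out, removed)

-- ===== PRECONDITION & SPEC =====
-- A's assert raises AssertionError when compute_number_wrong ≤ 0; those inputs are excluded.
def Pre_decrease_wronglist (compute_number_wrong : Int) (wrong_catalog : List String) (type : String) : Prop :=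
  0 < compute_number_wrong
instance (compute_number_wrong : Int) (wrong_catalog : List String) (type : String) : Decidable (Pre_decrease_wronglist compute_number_wrong wrong_catalog type) := by unfold Pre_decrease_wronglist; infer_instance

def pvWitness_decrease_wronglist : Int × List String × String := (1, ["a", "b", "a"], "a")

def Spec_decrease_wronglist (compute_number_wrong : Int) (wrong_catalog : List String) (type : String) (out : List String × Int) : Prop := out = decrease_wronglist_alt compute_number_wrong wrong_catalog type
instance (compute_number_wrong : Int) (wrong_catalog : List String) (type : String) (out : List String × Int) : Decidable (Spec_decrease_wronglist compute_number_wrong wrong_catalog type out) := by unfold Spec_decrease_wronglist; infer_instance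

-- ===== CLAIM (what is proved, stated in full; the proofs are below) =====
def Claim_equal_decrease_wronglist : Prop := ∀ (compute_number_wrong : Int) (wrong_catalog : List String) (type : String), Dom_decrease_wronglist compute_number_wrong wrong_catalog type → Pre_decrease_wronglist compute_number_wrong wrong_catalog type → Spec_decrease_wronglist compute_number_wrong wrong_catalog type (decrease_wronglist compute_number_wrong wrong_catalog type)

-- ===== LEMMAS AND PROOFS =====

-- canonical form: remove the first k occurrences of t
def pvEraseK (k : Nat) (t : String) (l : List String) : List String :=
  match k with
  | 0 => l
  | k + 1 => pvEraseK k t (l.erase t)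

theorem pvEraseK_cons_ne (k : Nat) (t x : String) (l : List String) (h : x ≠ t) :
    pvEraseK k t (x :: l) = x :: pvEraseK k t l := by
  induction k generalizing l with
  | zero => rfl
  | succ k ih =>
    show pvEraseK k t ((x :: l).erase t) = x :: pvEraseK k t (l.erase t)
    rw [List.erase_cons_tail (by simpa using h)]
    exact ih (l.erase t)

theorem pvA_removeAll_eq (fuel : Nat) (l : List String) (t : String)
    (h : l.count t ≤ fuel) : pvA_removeAll fuel l t = pvEraseK (l.count t) t l := by
  induction fuel generalizing l with
  | zero =>
    have : l.count t = 0 := Nat.le_zero.mp h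
    simp [pvA_removeAll, this, pvEraseK]
  | succ f ih =>
    by_cases hc : l.count t = 0
    · simp [pvA_removeAll, PySem.List.count_eq, hc, pvEraseK]
    · have hc' : 0 < l.count t := Nat.pos_of_ne_zero hc
      have hm : t ∈ l := List.count_pos_iff.mp hc'
      have hrem : PySem.List.remove? l t = some (l.erase t) :=
        PySem.List.remove?_eq_some_erase l t hm
      have hce : (l.erase t).count t = l.count t - 1 := by
        simp [List.count_erase_self]
      obtain ⟨c, hcs⟩ := Nat.exists_eq_succ_of_ne_zero hc
      have : (l.erase t).count t ≤ f := by omega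
      simp only [pvA_removeAll, PySem.List.count_eq, hrem]
      rw [if_pos hc', ih _ this, hcs]
      simp [pvEraseK, hce, hcs]

theorem pvA_removeN_eq (k : Nat) (l : List String) (t : String)
    (h : k ≤ l.count t) : pvA_removeN k l t = pvEraseK k t l := by
  induction k generalizing l with
  | zero => rfl
  | succ k ih =>
    have hm : t ∈ l := List.count_pos_iff.mp (by omega)
    have hrem : PySem.List.remove? l t = some (l.erase t) :=
      PySem.List.remove?_eq_some_erase l t hm
    have hce : (l.erase t).count t = l.count t - 1 := by
      simp [List.count_erase_self]
    have : k ≤ (l.erase t).count t := by omega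
    simp [pvA_removeN, hrem, ih _ this, pvEraseK]

-- the index list B builds, as a function
def pvJ (t : String) (s : Int) (l : List String) : List Int :=
  ((PySem.List.enumerate l s).filter (fun p => p.2 == t)).map (·.1)

theorem pvJ_cons (t : String) (s : Int) (x : String) (l : List String) :
    pvJ t s (x :: l) = if x == t then s :: pvJ t (s + 1) l else pvJ t (s + 1) l := by
  by_cases h : x == t <;> simp [pvJ, PySem.List.enumerate_cons, List.filter_cons, h]

theorem pvJ_shift (t : String) (s : Int) (l : List String) :
    pvJ t s l = (pvJ t 0 l).map (· + s) := by
  induction l generalizing s with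
  | nil => simp [pvJ, PySem.List.enumerate_nil]
  | cons x xs ih =>
    by_cases h : x == t <;>
      simp [pvJ_cons, h, ih (s + 1), ih 1, List.map_map, Function.comp] <;>
      (intro a _; omega)

theorem pvJ_length (t : String) (l : List String) :
    (pvJ t 0 l).length = l.count t := by
  induction l with
  | nil => simp [pvJ, PySem.List.enumerate_nil]
  | cons x xs ih =>
    by_cases h : x == t
    · have hx : x = t := by simpa using h
      simp [pvJ_cons, h, pvJ_shift t 1 xs, ih, hx, List.count_cons]
    · have hx : ¬ x = t := by simpa using h
      simp [pvJ_cons, h, pvJ_shift t 1 xs, ih, List.count_cons, hx]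

theorem pvJ_nonneg (t : String) (l : List String) : ∀ i ∈ pvJ t 0 l, 0 ≤ i := by
  induction l with
  | nil => simp [pvJ, PySem.List.enumerate_nil]
  | cons x xs ih =>
    intro i hi
    rw [pvJ_cons] at hi
    by_cases h : x == t
    · rw [if_pos h] at hi
      rcases List.mem_cons.mp hi with rfl | hi'
      · omega
      · rw [pvJ_shift] at hi'
        obtain ⟨j, hj, rfl⟩ := List.mem_map.mp hi'
        have := ih j hj; omega
    · rw [if_neg h, pvJ_shift] at hi
      obtain ⟨j, hj, rfl⟩ := List.mem_map.mp hi
      have := ih j hj; omega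

-- deleting shifted indices from a cons leaves the head untouched
theorem pvDel_shift (is : List Int) (x : String) (l : List String)
    (hnn : ∀ i ∈ is, 0 ≤ i) :
    List.foldr (fun i l' => List.eraseIdx l' i.toNat) (x :: l) (is.map (· + 1)) =
      x :: List.foldr (fun i l' => List.eraseIdx l' i.toNat) l is := by
  induction is with
  | nil => rfl
  | cons i is ih =>
    have hi : 0 ≤ i := hnn i (by simp)
    have ih' := ih (fun j hj => hnn j (by simp [hj]))
    have ht : (i + 1).toNat = i.toNat + 1 := by omega
    simp only [List.map_cons, List.foldr_cons, ih', ht, List.eraseIdx_cons_succ]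

-- B's deletion pass computes pvEraseK
theorem pvB_del_eq (t : String) (l : List String) (k : Nat) :
    List.foldr (fun i l' => List.eraseIdx l' i.toNat) l ((pvJ t 0 l).take k) =
      pvEraseK (min k (l.count t)) t l := by
  induction l generalizing k with
  | nil => simp [pvJ, PySem.List.enumerate_nil, pvEraseK]
  | cons x xs ih =>
    by_cases h : x == t
    · have hx : x = t := by simpa using h
      rw [pvJ_cons, if_pos h]
      simp only [zero_add]
      rw [pvJ_shift t 1 xs]
      cases k with
      | zero => simp [pvEraseK]
      | succ k =>
        rw [List.take_succ_cons, ← List.map_take]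
        simp only [List.foldr_cons]
        rw [pvDel_shift _ x xs (fun i hi => pvJ_nonneg t xs i (List.mem_of_mem_take hi))]
        have := ih k
        rw [this]
        have hmin : min (k + 1) ((x :: xs).count t) = min k (xs.count t) + 1 := by
          simp [List.count_cons, hx]
        rw [hmin]
        simp [pvEraseK, hx, List.erase_cons_head, List.eraseIdx_cons_zero]
    · have hx : ¬ x = t := by simpa using h
      rw [pvJ_cons, if_neg h]
      simp only [zero_add]
      rw [pvJ_shift t 1 xs, ← List.map_take]
      rw [pvDel_shift _ x xs (fun i hi => pvJ_nonneg t xs i (List.mem_of_mem_take hi))]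
      rw [ih k]
      have hmin : min k ((x :: xs).count t) = min k (xs.count t) := by
        simp [List.count_cons, hx]
      rw [hmin, pvEraseK_cons_ne _ _ _ _ hx]

-- orient B's reverse-foldl as a foldr
theorem pvB_out_eq (t : String) (l : List String) (k : Nat) :
    (((pvJ t 0 l).take k).reverse).foldl (fun l' i => List.eraseIdx l' i.toNat) l =
      pvEraseK (min k (l.count t)) t l := by
  rw [List.foldl_reverse]
  exact pvB_del_eq t l k

-- ===== VERDICT (by name: the statement is the Claim_ definition above) =====
theorem decrease_wronglist_spec : Claim_equal_decrease_wronglist := by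
  intro n l t _ hpre
  unfold Spec_decrease_wronglist decrease_wronglist decrease_wronglist_alt
  have hpre' : 0 < n := hpre
  have hJlen : ((((PySem.List.enumerate l).filter (fun p => p.2 == t)).map (·.1)) : List Int).length = l.count t := by
    simpa [pvJ] using pvJ_length t l
  simp only [PySem.List.count_eq]
  by_cases h0 : l.count t = 0
  · -- count = 0: A returns (l, 0); B's idxr list is empty
    have hJ : (((PySem.List.enumerate l).filter (fun p => p.2 == t)).map (·.1) : List Int) = [] := by
      have := hJlen; rw [h0] at this; exact List.eq_nil_of_length_eq_zero this
    simp [h0, hJ, Int.min_eq_left (le_of_lt hpre')]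
  · by_cases hlt : (l.count t : Int) < n
    · -- 0 < count < n : A removes all; removed = count
      have hc : 0 < l.count t := Nat.pos_of_ne_zero h0
      rw [if_neg h0, if_pos ⟨by exact_mod_cast hc, hlt⟩]
      have hA := pvA_removeAll_eq l.length l t (List.count_le_length)
      have hmin : min ((l.count t : Int)) n = (l.count t : Int) := min_eq_left (le_of_lt hlt)
      have hk : (min ((l.count t : Int)) n).toNat = l.count t := by rw [hmin]; simp
      have hB := pvB_out_eq t l (min ((l.count t : Int)) n).toNat
      rw [hk, Nat.min_self] at hB
      simp only [hJlen, hmin]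
      rw [hA]
      refine Prod.ext ?_ rfl
      simpa [pvJ, hk, hmin] using hB.symm
    · -- count ≥ n > 0 : A removes n; removed = n
      rw [not_lt] at hlt
      rw [if_neg h0, if_neg (by rintro ⟨-, h⟩; omega)]
      have hkn : n.toNat ≤ l.count t := by omega
      have hA := pvA_removeN_eq n.toNat l t hkn
      have hmin : min ((l.count t : Int)) n = n := min_eq_right hlt
      have hB := pvB_out_eq t l (min ((l.count t : Int)) n).toNat
      have hk : (min ((l.count t : Int)) n).toNat = n.toNat := by rw [hmin]
      rw [hk, Nat.min_eq_left hkn] at hB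
      simp only [hJlen, hmin]
      rw [hA]
      refine Prod.ext ?_ rfl
      simpa [pvJ, hk, hmin] using hB.symm
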